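-- pv_equiv track=rewrite | github.com/xnliang98/c2f-far | src/encode_document.py | flatten_documents
-- ===== SOURCE A (Python) =====
-- def flatten_documents(documents):
--     doc_indices = [] # (start sentence index, end sentence index) \in document
--     sentences = []
--     for document in documents:
--         doc_indices.append((len(sentences), len(sentences) + len(document)))
--         sentences.extend(document)
--     assert len(sentences) == doc_indices[-1][1]
--     return sentences, doc_indices
-- ===== SOURCE B (Python) =====
-- def flatten_documents(documents):
--     lengths = [len(d) for d in documents]
--     ends = []
--     total = 0
--     for n in lengths:
--         total += n
--         ends.append(total)
--     doc_indices = [(e - n, e) for n, e in zip(lengths, ends)]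
--     sentences = [s for d in documents for s in d]
--     return sentences, doc_indices
-- ===== Notes on version B (the rewrite author's own statement) =====
-- stated objective: simpler
-- what changed: B derives the index ranges from a separate pass of per-document lengths and their prefix sums (zipped into (end-len, end) pairs) and flattens the sentences independently, instead of A's single loop that interleaves appending ranges with extending the growing sentences list; B also returns a value on empty input where A raises.
-- crash fix: On documents == [] A raises IndexError at doc_indices[-1]; B returns ([], []). — e.g. on flatten_documents([]): A raises IndexError, B returns ([], [])
import Mathlib
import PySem

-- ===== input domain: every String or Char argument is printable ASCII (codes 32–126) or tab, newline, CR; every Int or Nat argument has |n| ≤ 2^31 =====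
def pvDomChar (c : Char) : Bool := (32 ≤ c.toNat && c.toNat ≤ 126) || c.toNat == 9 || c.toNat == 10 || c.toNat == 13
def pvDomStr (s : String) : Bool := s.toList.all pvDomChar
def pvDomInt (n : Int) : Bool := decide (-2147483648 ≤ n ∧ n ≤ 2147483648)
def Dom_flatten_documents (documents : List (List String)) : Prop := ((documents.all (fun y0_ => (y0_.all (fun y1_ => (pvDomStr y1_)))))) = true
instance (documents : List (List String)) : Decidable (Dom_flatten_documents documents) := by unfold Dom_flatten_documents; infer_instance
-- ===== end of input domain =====

-- B computes the index ranges from prefix sums of per-document lengths and flattens sentences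
-- separately (objective: simpler decomposition); on [] A raises IndexError while B returns ([], []).


-- ===== PORT A =====
-- A's loop: one pass appending (len(sentences), len(sentences)+len(document)) and extending sentences.
-- The trailing `assert len(sentences) == doc_indices[-1][1]` indexes doc_indices[-1], raising
-- IndexError on empty input; Pre_ excludes that input, so the port returns the pair directly.
def flatten_documents (documents : List (List String)) : List String × (List (Int × Int)) :=
  let st := documents.foldl
    (fun (acc : List String × List (Int × Int)) document =>
      (acc.1 ++ document, acc.2 ++ [((acc.1.length : Int), (acc.1.length : Int) + document.length)]))
    ([], [])
  (st.1, st.2)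

-- ===== PORT B =====
def flatten_documents_alt (documents : List (List String)) : List String × (List (Int × Int)) :=
  let lengths : List Int := documents.map (fun d => (d.length : Int))
  let ends : List Int :=
    (lengths.foldl (fun (acc : Int × List Int) n => (acc.1 + n, acc.2 ++ [acc.1 + n])) (0, [])).2
  let doc_indices := (lengths.zip ends).map (fun p => (p.2 - p.1, p.2))
  let sentences := documents.flatMap (fun d => d)
  (sentences, doc_indices)

-- ===== PRECONDITION & SPEC =====
-- A raises IndexError (doc_indices[-1] on the empty list) when documents == []; Pre_ excludes exactly that.
def Pre_flatten_documents (documents : List (List String)) : Prop := documents ≠ []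
instance (documents : List (List String)) : Decidable (Pre_flatten_documents documents) := by unfold Pre_flatten_documents; infer_instance
def pvWitness_flatten_documents : List (List String) := [["a", "b"], [], ["c"]]

-- On documents == [] A raises IndexError at doc_indices[-1]; B returns ([], []).
def Raises_flatten_documents (documents : List (List String)) : Prop := documents = []
instance (documents : List (List String)) : Decidable (Raises_flatten_documents documents) := by unfold Raises_flatten_documents; infer_instance
def pvRaiseWitness_flatten_documents : List (List String) := []
def pvRaiseWitnessOut_flatten_documents : List String × (List (Int × Int)) := ([], [])

def Spec_flatten_documents (documents : List (List String)) (out : List String × (List (Int × Int))) : Prop := out = flatten_documents_alt documents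
instance (documents : List (List String)) (out : List String × (List (Int × Int))) : Decidable (Spec_flatten_documents documents out) := by unfold Spec_flatten_documents; infer_instance

-- ===== CLAIM (what is proved, stated in full; the proofs are below) =====
def Claim_equal_flatten_documents : Prop := ∀ (documents : List (List String)), Dom_flatten_documents documents → Pre_flatten_documents documents → Spec_flatten_documents documents (flatten_documents documents)
def Claim_raises_flatten_documents : Prop := (∀ (documents : List (List String)), Dom_flatten_documents documents → Raises_flatten_documents documents → ¬ Pre_flatten_documents documents) ∧ (Dom_flatten_documents (pvRaiseWitness_flatten_documents) ∧ Raises_flatten_documents (pvRaiseWitness_flatten_documents) ∧ flatten_documents_alt (pvRaiseWitness_flatten_documents) = pvRaiseWitnessOut_flatten_documents)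

-- ===== LEMMAS AND PROOFS =====

-- common spec of the index list, starting at offset n
def idxSpec (n : Int) : List (List String) → List (Int × Int)
  | [] => []
  | d :: ds => (n, n + d.length) :: idxSpec (n + d.length) ds

-- prefix sums of ls starting from running total t
def endsSpec (t : Int) : List Int → List Int
  | [] => []
  | n :: ns => (t + n) :: endsSpec (t + n) ns

theorem foldA_eq (docs : List (List String)) (s : List String) (idx : List (Int × Int)) :
    docs.foldl
      (fun (acc : List String × List (Int × Int)) document =>
        (acc.1 ++ document, acc.2 ++ [((acc.1.length : Int), (acc.1.length : Int) + document.length)]))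
      (s, idx)
    = (s ++ docs.flatMap (fun d => d), idx ++ idxSpec (s.length) docs) := by
  induction docs generalizing s idx with
  | nil => simp [idxSpec]
  | cons d ds ih =>
    simp only [List.foldl_cons, ih]
    simp [idxSpec, List.append_assoc]

theorem foldB_eq (ls : List Int) (t : Int) (acc : List Int) :
    (ls.foldl (fun (acc : Int × List Int) n => (acc.1 + n, acc.2 ++ [acc.1 + n])) (t, acc)).2
    = acc ++ endsSpec t ls := by
  induction ls generalizing t acc with
  | nil => simp [endsSpec]
  | cons n ns ih => simp [ih, endsSpec, List.append_assoc]

theorem zip_ends_eq (docs : List (List String)) (t : Int) :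
    ((docs.map (fun d => (d.length : Int))).zip
        (endsSpec t (docs.map (fun d => (d.length : Int))))).map
      (fun p => (p.2 - p.1, p.2))
    = idxSpec t docs := by
  induction docs generalizing t with
  | nil => simp [idxSpec]
  | cons d ds ih =>
    simp only [List.map_cons, endsSpec, List.zip_cons_cons, List.map_cons, idxSpec, ih]
    rw [show t + (d.length : Int) - (d.length : Int) = t by ring]

-- ===== VERDICT (by name: the statement is the Claim_ definition above) =====
theorem flatten_documents_spec : Claim_equal_flatten_documents := by
  intro documents _ _
  unfold Spec_flatten_documents flatten_documents flatten_documents_alt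
  simp only [foldA_eq, foldB_eq, List.nil_append, zip_ends_eq]
  norm_num

@[simp]
theorem flatten_documents_raises : Claim_raises_flatten_documents := by
  unfold Claim_raises_flatten_documents
  refine ⟨?_, by decide⟩
  intro d _ h
  unfold Raises_flatten_documents at h
  simp [Pre_flatten_documents, h]
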